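-- pv_equiv track=rewrite | github.com/antismash/antismash | antismash/modules/cluster_compare/ordering.py | _build_segments_from_pairings
-- ===== SOURCE A (Python) =====
-- from typing import (
--     Dict,
--     List,
--     Sequence,
--     Tuple,
-- )
--
-- Pairing = Tuple[int, int, bool]
--
-- def _build_segments_from_pairings(pairings: Sequence[Pairing]) -> List[List[Pairing]]:
--     """ Takes a sequence of pairings and separates them into contiguous chunks.
--
--         A mismatching strand is considered a break in contiguity of matching strands.
--
--         Arguments:
--             pairings: a sequence of tuples of the form (query index, reference index, strand match)
--
--         Returns:
--             all provided pairings in a series of lists, each list being a contiguous chunk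
--     """
--     if not pairings:
--         return []
--     segments = [[pairings[0]]]
--     for pairing in pairings[1:]:
--         prev_cds, prev_ref, prev_strand_match = segments[-1][-1]
--         cds, ref, strand_match = pairing
--         if cds <= prev_cds:
--             raise ValueError("pairs not ordered by first index")
--         if any([
--             prev_strand_match != strand_match,  # strands no longer match
--             cds != prev_cds + 1,  # CDSes aren't contiguous
--             abs(ref - prev_ref) != 1,   # references aren't contiguous
--         ]):
--             segments.append([])
--         segments[-1].append(pairing)
--     return segments
-- ===== SOURCE B (Python) =====
-- from typing import List, Sequence, Tuple
--
-- Pairing = Tuple[int, int, bool]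
--
--
-- def _build_segments_from_pairings(pairings: Sequence[Pairing]) -> List[List[Pairing]]:
--     """Validate ordering up front, then cut the sequence into maximal runs:
--     an outer loop picks the start of each segment, an inner scan extends it
--     while adjacent pairs stay contiguous."""
--     pairings = list(pairings)
--     if any(c <= pc for (pc, _, _), (c, _, _) in zip(pairings, pairings[1:])):
--         raise ValueError("pairs not ordered by first index")
--
--     def is_break(prev: Pairing, cur: Pairing) -> bool:
--         return prev[2] != cur[2] or cur[0] != prev[0] + 1 or abs(cur[1] - prev[1]) != 1
--
--     segments = []
--     n = len(pairings)
--     start = 0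
--     while start < n:
--         end = start + 1
--         while end < n and not is_break(pairings[end - 1], pairings[end]):
--             end += 1
--         segments.append(pairings[start:end])
--         start = end
--     return segments
-- ===== Notes on version B (the rewrite author's own statement) =====
-- stated objective: alternative
-- what changed: A grows a nested segments list element-by-element with append-or-start-new-list and an interleaved order check; B validates the ordering in one upfront pass and then partitions the list into maximal contiguous runs with an outer start/end two-index scan that slices each whole segment at once.
import Mathlib
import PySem

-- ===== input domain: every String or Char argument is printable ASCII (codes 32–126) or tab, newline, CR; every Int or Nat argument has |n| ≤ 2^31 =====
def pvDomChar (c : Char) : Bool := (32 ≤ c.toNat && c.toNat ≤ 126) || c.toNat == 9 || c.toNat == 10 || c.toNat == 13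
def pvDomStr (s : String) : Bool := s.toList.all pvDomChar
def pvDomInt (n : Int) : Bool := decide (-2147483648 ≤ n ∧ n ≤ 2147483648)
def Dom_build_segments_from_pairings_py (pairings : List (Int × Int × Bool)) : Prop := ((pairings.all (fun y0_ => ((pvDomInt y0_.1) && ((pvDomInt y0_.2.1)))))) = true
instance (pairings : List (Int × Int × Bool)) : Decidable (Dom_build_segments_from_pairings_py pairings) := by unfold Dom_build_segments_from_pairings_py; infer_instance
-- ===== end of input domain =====

-- B replaces A's append-or-start-new-list accumulation by an upfront order check plus a
-- two-level scan that cuts out each maximal contiguous run as a whole slice (objective: alternative).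

-- ===== PORT A =====
-- A's loop body; `segments` is kept with both the list of segments and each segment REVERSED
-- (so segments[-1][-1] is the head of the head); a raised ValueError is `none`.
def pvStepA (acc : Option (List (List (Int × Int × Bool)))) (pairing : Int × Int × Bool) :
    Option (List (List (Int × Int × Bool))) :=
  match acc with
  | none => none
  | some segs =>
    let prev := (segs.headD []).headD (0, 0, false)
    if pairing.1 ≤ prev.1 then none  -- raise ValueError("pairs not ordered by first index")
    else
      let segs2 := if (prev.2.2 != pairing.2.2) || (pairing.1 != prev.1 + 1)
                      || ((pairing.2.1 - prev.2.1).natAbs != 1)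
                   then [] :: segs else segs
      some ((pairing :: segs2.headD []) :: segs2.tail)

def build_segments_from_pairings_py (pairings : List (Int × Int × Bool)) :
    List (List (Int × Int × Bool)) :=
  match pairings with
  | [] => []
  | p0 :: rest =>
    let res := rest.foldl pvStepA (some [[p0]])
    -- un-reverse the accumulator; on the raising inputs (res = none, outside Pre_) return []
    ((res.getD []).map List.reverse).reverse

-- ===== PORT B =====
def pvIsBreak (prev cur : Int × Int × Bool) : Bool :=
  (prev.2.2 != cur.2.2) || (cur.1 != prev.1 + 1) || ((cur.2.1 - prev.2.1).natAbs != 1)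

-- inner `while` of Source B: extend the current segment past `prev` while no break;
-- returns (rest of current segment, remainder of the list)
def pvTakeRun (prev : Int × Int × Bool) : List (Int × Int × Bool) →
    List (Int × Int × Bool) × List (Int × Int × Bool)
  | [] => ([], [])
  | q :: rest =>
    if pvIsBreak prev q then ([], q :: rest)
    else ((q :: (pvTakeRun q rest).1), (pvTakeRun q rest).2)

theorem pvTakeRun_len : ∀ (rest : List (Int × Int × Bool)) (prev : Int × Int × Bool),
    (pvTakeRun prev rest).2.length ≤ rest.length := by
  intro rest
  induction rest with
  | nil => intro prev; simp [pvTakeRun]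
  | cons q rest ih =>
    intro prev
    simp only [pvTakeRun]
    split
    · simp
    · exact Nat.le_succ_of_le (ih q)

-- outer `while` of Source B: cut off one maximal run, then continue on the remainder
def pvSplitRuns : List (Int × Int × Bool) → List (List (Int × Int × Bool))
  | [] => []
  | p :: rest => (p :: (pvTakeRun p rest).1) :: pvSplitRuns (pvTakeRun p rest).2
termination_by l => l.length
decreasing_by
  simp only [List.length_cons]
  exact Nat.lt_succ_of_le (pvTakeRun_len rest p)

def build_segments_from_pairings_py_alt (pairings : List (Int × Int × Bool)) :
    List (List (Int × Int × Bool)) :=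
  -- upfront ordering check (raise ValueError, outside Pre_, rendered as [])
  if (pairings.zip pairings.tail).any (fun pq => pq.2.1 ≤ pq.1.1) then []
  else pvSplitRuns pairings

-- ===== PRECONDITION & SPEC =====
-- Pre_ excludes exactly the inputs on which A raises ValueError: some adjacent pair
-- with a non-increasing first component.
def Pre_build_segments_from_pairings_py (pairings : List (Int × Int × Bool)) : Prop :=
  ((pairings.zip pairings.tail).all (fun pq => pq.1.1 < pq.2.1)) = true
instance (pairings : List (Int × Int × Bool)) : Decidable (Pre_build_segments_from_pairings_py pairings) := by unfold Pre_build_segments_from_pairings_py; infer_instance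

def pvWitness_build_segments_from_pairings_py : (List (Int × Int × Bool)) :=
  [(1, 5, true), (2, 4, true), (4, 7, false)]

def Spec_build_segments_from_pairings_py (pairings : List (Int × Int × Bool)) (out : List (List (Int × Int × Bool))) : Prop := out = build_segments_from_pairings_py_alt pairings
instance (pairings : List (Int × Int × Bool)) (out : List (List (Int × Int × Bool))) : Decidable (Spec_build_segments_from_pairings_py pairings out) := by unfold Spec_build_segments_from_pairings_py; infer_instance

-- ===== CLAIM (what is proved, stated in full; the proofs are below) =====
def Claim_equal_build_segments_from_pairings_py : Prop := ∀ (pairings : List (Int × Int × Bool)), Dom_build_segments_from_pairings_py pairings → Pre_build_segments_from_pairings_py pairings → Spec_build_segments_from_pairings_py pairings (build_segments_from_pairings_py pairings)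

-- ===== LEMMAS AND PROOFS =====

-- reference recursion: current segment accumulated reversed in `segRev`
def pvGo : List (Int × Int × Bool) → List (Int × Int × Bool) → List (List (Int × Int × Bool))
  | segRev, [] => [segRev.reverse]
  | segRev, q :: rest =>
    if pvIsBreak (segRev.headD (0, 0, false)) q then segRev.reverse :: pvGo [q] rest
    else pvGo (q :: segRev) rest

theorem pvGo_eq_runs : ∀ (rest : List (Int × Int × Bool)) (a : Int × Int × Bool)
    (t : List (Int × Int × Bool)),
    pvGo (a :: t) rest
      = ((a :: t).reverse ++ (pvTakeRun a rest).1) :: pvSplitRuns (pvTakeRun a rest).2 := by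
  intro rest
  induction rest with
  | nil => intro a t; simp [pvGo, pvTakeRun, pvSplitRuns]
  | cons q rest ih =>
    intro a t
    simp only [pvGo, pvTakeRun, List.headD_cons]
    split
    · rw [ih q []]
      simp [pvSplitRuns]
    · rw [ih q (a :: t)]
      simp

theorem pvSplitRuns_eq_go (p : Int × Int × Bool) (rest : List (Int × Int × Bool)) :
    pvSplitRuns (p :: rest) = pvGo [p] rest := by
  rw [pvGo_eq_runs rest p []]
  simp [pvSplitRuns]

def pvFinish (res : Option (List (List (Int × Int × Bool)))) : List (List (Int × Int × Bool)) :=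
  ((res.getD []).map List.reverse).reverse

theorem pvFoldA : ∀ (rest : List (Int × Int × Bool)) (a : Int × Int × Bool)
    (t : List (Int × Int × Bool)) (doneRev : List (List (Int × Int × Bool))),
    (((a :: rest).zip rest).all (fun pq => pq.1.1 < pq.2.1)) = true →
    pvFinish (rest.foldl pvStepA (some ((a :: t) :: doneRev)))
      = (doneRev.map List.reverse).reverse ++ pvGo (a :: t) rest := by
  intro rest
  induction rest with
  | nil =>
    intro a t doneRev _
    simp [pvFinish, pvGo]
  | cons q rest ih =>
    intro a t doneRev hch
    simp only [List.zip_cons_cons, List.all_cons, Bool.and_eq_true, decide_eq_true_eq] at hch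
    obtain ⟨hlt, hch⟩ := hch
    have hstep : pvStepA (some ((a :: t) :: doneRev)) q
        = some (if pvIsBreak a q then ([q] :: (a :: t) :: doneRev)
                else ((q :: a :: t) :: doneRev)) := by
      simp only [pvStepA, pvIsBreak, List.headD_cons]
      rw [if_neg (by omega)]
      split <;> rfl
    rw [List.foldl_cons, hstep]
    by_cases hb : pvIsBreak a q
    · rw [if_pos hb]
      rw [ih q [] ((a :: t) :: doneRev) (by simpa using hch)]
      simp only [pvGo, List.headD_cons, if_pos hb]
      simp
    · rw [if_neg hb]
      rw [ih q (a :: t) doneRev (by simpa using hch)]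
      simp only [pvGo, List.headD_cons, if_neg hb]

theorem pvNoRaise : ∀ (xs : List (Int × Int × Bool)),
    ((xs.zip xs.tail).all (fun pq => pq.1.1 < pq.2.1)) = true →
    (xs.zip xs.tail).any (fun pq => pq.2.1 ≤ pq.1.1) = false := by
  intro xs
  induction xs with
  | nil => intro _; simp
  | cons x xs ih =>
    intro hch
    cases xs with
    | nil => simp
    | cons y ys =>
      simp only [List.tail_cons, List.zip_cons_cons, List.all_cons, Bool.and_eq_true,
        decide_eq_true_eq] at hch
      obtain ⟨hlt, hch⟩ := hch
      simp only [List.tail_cons] at ih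
      simp only [List.tail_cons, List.zip_cons_cons, List.any_cons]
      rw [ih (by simpa using hch)]
      simp only [Bool.or_false, decide_eq_false_iff_not]
      omega

-- ===== VERDICT (by name: the statement is the Claim_ definition above) =====
theorem build_segments_from_pairings_py_spec : Claim_equal_build_segments_from_pairings_py := by
  intro pairings _ hpre
  unfold Spec_build_segments_from_pairings_py
  unfold Pre_build_segments_from_pairings_py at hpre
  cases pairings with
  | nil => simp [build_segments_from_pairings_py, build_segments_from_pairings_py_alt, pvSplitRuns]
  | cons p0 rest =>
    show pvFinish (rest.foldl pvStepA (some [[p0]])) = _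
    rw [pvFoldA rest p0 [] [] (by simpa using hpre)]
    unfold build_segments_from_pairings_py_alt
    rw [pvNoRaise _ hpre]
    simp [pvSplitRuns_eq_go]
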